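-- pv_equiv track=rewrite | github.com/sev-/ImageDiff | ImageDiffwithPython/main.py | calculate_reference_builds
-- ===== SOURCE A (Python) =====
-- def calculate_reference_builds(all_movies, builds, build_movie_frames):
--     """Calculate reference builds for each movie in each build."""
--     movie_reference_builds = {}
--     for movie in all_movies:
--         movie_reference_builds[movie] = {}
--         for i, current_build in enumerate(builds):
--             has_in_current = movie in build_movie_frames.get(current_build, {})
--
--             if not has_in_current:
--                 reference_build = None
--                 for j in range(i+1, len(builds)):
--                     if movie in build_movie_frames.get(builds[j], {}):
--                         reference_build = builds[j]
--                         break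
--                 movie_reference_builds[movie][current_build] = reference_build
--     return movie_reference_builds
-- ===== SOURCE B (Python) =====
-- def calculate_reference_builds(all_movies, builds, build_movie_frames):
--     """Calculate reference builds for each movie in each build.
--
--     One shared right-to-left pass over the builds precomputes, for every build
--     position, a snapshot dict mapping each movie to the nearest later build
--     that contains it; the result is then assembled per movie without any
--     rescan of the builds list."""
--     nxt = {}
--     snaps = []
--     for b in reversed(builds):
--         snaps.append(nxt)
--         upd = dict(nxt)
--         for movie in build_movie_frames.get(b, {}):
--             upd[movie] = b
--         nxt = upd
--     snaps.reverse()
--     return {movie: {b: snap.get(movie)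
--                     for b, snap in zip(builds, snaps)
--                     if movie not in build_movie_frames.get(b, {})}
--             for movie in all_movies}
-- ===== Notes on version B (the rewrite author's own statement) =====
-- stated objective: faster
-- what changed: Replaces A's inner linear rescan of the remaining builds for every (movie, build) pair by one shared right-to-left pass over the builds that precomputes per-position snapshot dicts (movie -> nearest later containing build), from which each movie's row is assembled by direct lookup.
import Mathlib
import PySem

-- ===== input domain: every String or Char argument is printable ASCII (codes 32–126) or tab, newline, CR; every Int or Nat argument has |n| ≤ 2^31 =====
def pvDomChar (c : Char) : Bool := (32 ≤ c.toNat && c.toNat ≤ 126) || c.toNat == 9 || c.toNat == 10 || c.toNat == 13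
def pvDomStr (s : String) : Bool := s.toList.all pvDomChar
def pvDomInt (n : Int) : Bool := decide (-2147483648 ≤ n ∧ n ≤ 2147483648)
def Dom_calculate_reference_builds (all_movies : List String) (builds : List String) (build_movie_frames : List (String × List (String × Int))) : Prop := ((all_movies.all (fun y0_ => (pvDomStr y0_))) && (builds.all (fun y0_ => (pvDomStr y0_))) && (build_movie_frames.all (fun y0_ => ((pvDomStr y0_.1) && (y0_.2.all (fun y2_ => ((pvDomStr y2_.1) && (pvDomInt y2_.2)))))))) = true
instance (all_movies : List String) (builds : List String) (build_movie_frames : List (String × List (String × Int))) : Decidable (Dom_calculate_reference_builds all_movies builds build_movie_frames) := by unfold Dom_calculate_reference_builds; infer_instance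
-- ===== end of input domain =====

-- B replaces A's per-(movie,build) rescan of the remaining builds by ONE shared right-to-left
-- pass over the builds that records, per build position, a snapshot dict movie ↦ nearest later
-- containing build; the result is then assembled per movie from these snapshots.

-- `movie in build_movie_frames.get(b, {})` (used verbatim by both Pythons)
def pvHas (build_movie_frames : List (String × List (String × Int))) (movie b : String) : Bool :=
  (PySem.Dict.mk ((PySem.Dict.mk build_movie_frames).getD b [])).contains movie

-- ===== PORT A =====
-- `for j in range(i+1, len(builds)): if movie in …: reference_build = builds[j]; break`
def pvFindRefA (build_movie_frames : List (String × List (String × Int))) (movie : String)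
    (builds : List String) : List Int → Option String
  | [] => none
  | j :: rest =>
    match PySem.List.pyGet? builds j with
    | none => none   -- unreachable: j is always in range
    | some b => if pvHas build_movie_frames movie b then some b
                else pvFindRefA build_movie_frames movie builds rest

-- the inner `for i, current_build in enumerate(builds)` loop, filling movie's dict
def pvInnerA (build_movie_frames : List (String × List (String × Int))) (movie : String)
    (builds : List String) : PySem.Dict String (Option String) :=
  (PySem.List.enumerate builds).foldl
    (fun d p =>
      if pvHas build_movie_frames movie p.2 then d
      else d.insert p.2 (pvFindRefA build_movie_frames movie builds
            (PySem.List.pyRange (p.1 + 1) (builds.length : Int) 1)))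
    PySem.Dict.empty

def calculate_reference_builds (all_movies : List String) (builds : List String) (build_movie_frames : List (String × List (String × Int))) : List (String × List (String × Option String)) :=
  ((all_movies.foldl
      (fun acc movie => acc.insert movie (pvInnerA build_movie_frames movie builds))
      PySem.Dict.empty).items).map (fun p => (p.1, p.2.items))

-- ===== PORT B =====
-- `upd = dict(nxt); for movie in build_movie_frames.get(b, {}): upd[movie] = b`
def pvUpd (build_movie_frames : List (String × List (String × Int)))
    (nxt : PySem.Dict String String) (b : String) : PySem.Dict String String :=
  ((PySem.Dict.mk ((PySem.Dict.mk build_movie_frames).getD b [])).keys).foldl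
    (fun d movie => d.insert movie b) nxt

-- `for b in reversed(builds): snaps.append(nxt); … nxt = upd` — returns (snaps, nxt)
def pvSnapScan (build_movie_frames : List (String × List (String × Int)))
    (builds : List String) : List (PySem.Dict String String) × PySem.Dict String String :=
  builds.reverse.foldl
    (fun st b => (st.1 ++ [st.2], pvUpd build_movie_frames st.2 b))
    ([], PySem.Dict.empty)

def calculate_reference_builds_alt (all_movies : List String) (builds : List String) (build_movie_frames : List (String × List (String × Int))) : List (String × List (String × Option String)) :=
  let snaps := (pvSnapScan build_movie_frames builds).1.reverse   -- snaps.reverse()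
  ((all_movies.foldl
      (fun acc movie =>
        acc.insert movie
          ((builds.zip snaps).foldl
            (fun d p => if pvHas build_movie_frames movie p.1 then d
                        else d.insert p.1 (p.2.get? movie))
            PySem.Dict.empty))
      PySem.Dict.empty).items).map (fun p => (p.1, p.2.items))

-- ===== PRECONDITION & SPEC =====
def Spec_calculate_reference_builds (all_movies : List String) (builds : List String) (build_movie_frames : List (String × List (String × Int))) (out : List (String × List (String × Option String))) : Prop := out = calculate_reference_builds_alt all_movies builds build_movie_frames
instance (all_movies : List String) (builds : List String) (build_movie_frames : List (String × List (String × Int))) (out : List (String × List (String × Option String))) : Decidable (Spec_calculate_reference_builds all_movies builds build_movie_frames out) := by unfold Spec_calculate_reference_builds; infer_instance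

-- ===== CLAIM (what is proved, stated in full; the proofs are below) =====
def Claim_equal_calculate_reference_builds : Prop := ∀ (all_movies : List String) (builds : List String) (build_movie_frames : List (String × List (String × Int))), Dom_calculate_reference_builds all_movies builds build_movie_frames → Spec_calculate_reference_builds all_movies builds build_movie_frames (calculate_reference_builds all_movies builds build_movie_frames)

-- ===== LEMMAS AND PROOFS =====

-- first build (scanning left to right) satisfying p
def pvFirstP (p : String → Bool) : List String → Option String
  | [] => none
  | b :: r => if p b then some b else pvFirstP p r

-- for each build: (build, present here, first later build that is present)
def pvSpecPairs (p : String → Bool) : List String → List (String × Bool × Option String)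
  | [] => []
  | b :: r => (b, p b, pvFirstP p r) :: pvSpecPairs p r

-- the dict-filling step both inner loops perform, expressed on a spec pair
def pvStep (d : PySem.Dict String (Option String)) (e : String × Bool × Option String) :
    PySem.Dict String (Option String) :=
  if e.2.1 then d else d.insert e.1 e.2.2

-- A's index search over range(k, len(builds)) is the first present build of drop k
theorem pvFindRefA_eq (bmf : List (String × List (String × Int))) (movie : String)
    (builds : List String) (k : Nat) :
    pvFindRefA bmf movie builds (PySem.List.pyRange (k : Int) (builds.length : Int) 1)
      = pvFirstP (pvHas bmf movie) (builds.drop k) := by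
  by_cases hk : k < builds.length
  · rw [PySem.List.pyRange_one_cons (by exact_mod_cast hk)]
    have hget : PySem.List.pyGet? builds (k : Int) = some builds[k] := by
      simp [PySem.List.pyGet?, PySem.List.pyIdx?, hk]
    have hdrop : builds.drop k = builds[k] :: builds.drop (k + 1) :=
      List.drop_eq_getElem_cons hk
    rw [hdrop]
    show (match PySem.List.pyGet? builds (k : Int) with
      | none => none
      | some b => if pvHas bmf movie b then some b
                  else pvFindRefA bmf movie builds (PySem.List.pyRange ((k : Int) + 1) (builds.length : Int) 1))
      = _
    rw [hget]
    have : ((k : Int) + 1) = ((k + 1 : Nat) : Int) := by push_cast; ring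
    rw [this, pvFindRefA_eq bmf movie builds (k + 1)]
    rfl
  · have h1 : PySem.List.pyRange (k : Int) (builds.length : Int) 1 = [] := by
      simp [PySem.List.pyRange]; omega
    have h2 : builds.drop k = [] := List.drop_eq_nil_of_le (by omega)
    rw [h1, h2]; rfl
termination_by builds.length - k

-- A's enumerate loop = folding pvStep over the spec pairs (suffix-generalised)
theorem pvInnerA_fold (bmf : List (String × List (String × Int))) (movie : String)
    (builds : List String) (bs : List String) (k : Nat)
    (hbs : bs = builds.drop k) (d : PySem.Dict String (Option String)) :
    (PySem.List.enumerate bs (k : Int)).foldl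
      (fun d p =>
        if pvHas bmf movie p.2 then d
        else d.insert p.2 (pvFindRefA bmf movie builds
              (PySem.List.pyRange (p.1 + 1) (builds.length : Int) 1)))
      d
    = (pvSpecPairs (pvHas bmf movie) bs).foldl pvStep d := by
  induction bs generalizing k d with
  | nil => rfl
  | cons b r ih =>
    have hk : k < builds.length := by
      by_contra h
      rw [List.drop_eq_nil_of_le (by omega)] at hbs
      simp at hbs
    have hdrop : builds.drop k = builds[k] :: builds.drop (k + 1) :=
      List.drop_eq_getElem_cons hk
    rw [hdrop] at hbs
    obtain ⟨hb, hr⟩ := List.cons.inj hbs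
    rw [PySem.List.enumerate_cons]
    simp only [List.foldl_cons, pvSpecPairs]
    have hcast : ((k : Int) + 1) = ((k + 1 : Nat) : Int) := by push_cast; ring
    have hstep :
        (if pvHas bmf movie b then d
         else d.insert b (pvFindRefA bmf movie builds
               (PySem.List.pyRange ((k : Int) + 1) (builds.length : Int) 1)))
        = pvStep d (b, pvHas bmf movie b, pvFirstP (pvHas bmf movie) r) := by
      rw [hcast, pvFindRefA_eq, ← hr]
      rfl
    rw [hstep, hcast, ih (k + 1) hr]

-- the final nxt dict after B's scan has processed the suffix l (right to left)
def pvNxtOf (bmf : List (String × List (String × Int))) : List String → PySem.Dict String String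
  | [] => PySem.Dict.empty
  | b :: r => pvUpd bmf (pvNxtOf bmf r) b

-- the snapshot list, aligned with the builds: entry for b :: r is the nxt of r
def pvSnapsOf (bmf : List (String × List (String × Int))) : List String → List (PySem.Dict String String)
  | [] => []
  | _ :: r => pvNxtOf bmf r :: pvSnapsOf bmf r

-- lookup through the key-insert loop of pvUpd
theorem pvUpd_get? (bmf : List (String × List (String × Int))) (movie b : String)
    (d : PySem.Dict String String) :
    (pvUpd bmf d b).get? movie = if pvHas bmf movie b then some b else d.get? movie := by
  unfold pvUpd pvHas
  rw [PySem.Dict.contains_eq_decide_mem_keys]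
  generalize (PySem.Dict.mk ((PySem.Dict.mk bmf).getD b [])).keys = ks
  induction ks generalizing d with
  | nil => simp
  | cons k r ih =>
    simp only [List.foldl_cons, ih, List.mem_cons]
    by_cases hm : movie ∈ r
    · simp [hm]
    · by_cases he : movie = k
      · simp [he, PySem.Dict.get?_insert_self]
      · simp [hm, he, PySem.Dict.get?_insert_of_ne _ _ he]

-- B's reversed fold produces exactly the snapshot list and final nxt of pvNxtOf/pvSnapsOf
theorem pvSnapScan_eq (bmf : List (String × List (String × Int))) (l : List String) :
    pvSnapScan bmf l = ((pvSnapsOf bmf l).reverse, pvNxtOf bmf l) := by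
  induction l with
  | nil => rfl
  | cons b r ih =>
    unfold pvSnapScan at *
    simp only [List.reverse_cons, List.foldl_append, ih, List.foldl_cons, List.foldl_nil]
    simp [pvSnapsOf, pvNxtOf]

-- the nxt dict answers with the first later containing build
theorem pvNxtOf_get? (bmf : List (String × List (String × Int))) (movie : String)
    (l : List String) :
    (pvNxtOf bmf l).get? movie = pvFirstP (pvHas bmf movie) l := by
  induction l with
  | nil => simp [pvNxtOf, pvFirstP, PySem.Dict.get?_empty]
  | cons b r ih => rw [pvNxtOf, pvUpd_get?, ih]; rfl

-- B's assembly fold over zip builds snaps = folding pvStep over the spec pairs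
theorem pvInnerB_fold (bmf : List (String × List (String × Int))) (movie : String)
    (l : List String) (d : PySem.Dict String (Option String)) :
    (l.zip (pvSnapsOf bmf l)).foldl
      (fun d p => if pvHas bmf movie p.1 then d else d.insert p.1 (p.2.get? movie)) d
    = (pvSpecPairs (pvHas bmf movie) l).foldl pvStep d := by
  induction l generalizing d with
  | nil => rfl
  | cons b r ih =>
    simp only [pvSnapsOf, List.zip_cons_cons, List.foldl_cons, pvSpecPairs]
    rw [pvNxtOf_get?]
    exact ih _

-- ===== VERDICT (by name: the statement is the Claim_ definition above) =====
theorem calculate_reference_builds_spec : Claim_equal_calculate_reference_builds := by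
  intro all_movies builds bmf _
  unfold Spec_calculate_reference_builds
  unfold calculate_reference_builds calculate_reference_builds_alt
  rw [pvSnapScan_eq, List.reverse_reverse]
  have hfun :
      (fun (acc : PySem.Dict String (PySem.Dict String (Option String))) movie =>
        acc.insert movie (pvInnerA bmf movie builds))
      = (fun acc movie =>
        acc.insert movie
          ((builds.zip (pvSnapsOf bmf builds)).foldl
            (fun d p => if pvHas bmf movie p.1 then d else d.insert p.1 (p.2.get? movie))
            PySem.Dict.empty)) := by
    funext acc movie
    rw [pvInnerB_fold]
    have hA := pvInnerA_fold bmf movie builds builds 0 (by simp) PySem.Dict.empty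
    simp only [Nat.cast_zero] at hA
    rw [pvInnerA, hA]
  rw [hfun]
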